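-- pv_equiv track=rewrite | github.com/namhyong/algorithm | _외톨이 알파벳.py | solution
-- ===== SOURCE A (Python) =====
-- def solution(input_string):
--     answer =''
--     count = {}
--     answer_list = []
--     for idx, char in enumerate(input_string):
--         if char not in count:
--             count[char] = [idx]
--         else:
--             count[char].append(idx)
--
--     for key, value in count.items():
--         if len(value)>= 2:
--             for i in range(len(value)-1):
--                 if value[i+1]- value[i] >1:
--                     answer_list.append(key)
--                     break
--     if len(answer_list) == 0:
--         answer = "N"
--     else:
--         answer = ''.join(sorted(answer_list))
--     return answer
-- ===== SOURCE B (Python) =====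
-- def solution(input_string):
--     prev = None
--     seen = set()
--     answer = set()
--     for ch in input_string:
--         if ch != prev:
--             if ch in seen:
--                 answer.add(ch)
--             seen.add(ch)
--             prev = ch
--     return ''.join(sorted(answer)) if answer else "N"
-- ===== Notes on version B (the rewrite author's own statement) =====
-- stated objective: simpler
-- what changed: Replaced the dict-of-index-lists build plus per-key adjacent-gap scan by a single left-to-right pass that run-compresses the string on the fly: a character is an outlier exactly when a new run starts on a character already seen in a completed run.
import Mathlib
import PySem

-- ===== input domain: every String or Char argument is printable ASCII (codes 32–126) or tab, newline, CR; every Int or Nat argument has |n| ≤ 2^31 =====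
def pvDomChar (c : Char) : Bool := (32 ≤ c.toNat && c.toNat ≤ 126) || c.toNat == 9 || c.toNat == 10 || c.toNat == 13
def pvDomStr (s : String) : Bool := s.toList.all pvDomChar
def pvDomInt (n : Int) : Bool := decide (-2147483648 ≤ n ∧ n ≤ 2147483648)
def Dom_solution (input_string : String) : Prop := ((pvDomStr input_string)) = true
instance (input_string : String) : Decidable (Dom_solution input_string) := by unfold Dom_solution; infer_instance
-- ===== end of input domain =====

-- B replaces A's dict-of-index-lists build plus per-key adjacent-gap scan by one
-- run-compressing pass with a `seen` set (objective: simpler; same asymptotic cost).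

-- ===== PORT A =====
-- inner loop 'for i in range(len(value)-1): if value[i+1]-value[i] > 1: append key; break'
-- (value[i] is ported with pyGetD; every index produced by the range is in bounds)
def gapLoop (value : List Int) : List Int → Bool
  | [] => false
  | i :: rest =>
    if 1 < PySem.List.pyGetD value (i + 1) 0 - PySem.List.pyGetD value i 0 then true
    else gapLoop value rest

-- 'for idx, char in enumerate(input_string): if char not in count: count[char]=[idx] else: count[char].append(idx)'
def buildCount (pairs : List (Int × Char)) : PySem.Dict Char (List Int) :=
  pairs.foldl
    (fun d p =>
      if d.contains p.2 = false then d.insert p.2 [p.1]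
      else d.insert p.2 (d.getD p.2 [] ++ [p.1]))
    PySem.Dict.empty

def solution (input_string : String) : String :=
  let count := buildCount (PySem.List.enumerate input_string.toList 0)
  let answer_list : List Char :=
    count.items.foldl
      (fun acc kv =>
        if 2 ≤ kv.2.length then
          (if gapLoop kv.2 (PySem.List.pyRange 0 ((kv.2.length : Int) - 1) 1)
           then acc ++ [kv.1] else acc)
        else acc)
      []
  if answer_list.length = 0 then "N"
  -- ''.join(sorted(answer_list)) on one-character strings
  else String.ofList (PySem.List.sorted answer_list (fun c => c) false)

-- ===== PORT B =====
-- state (prev, seen, answer); 'if ch != prev: (ch in seen → answer.add); seen.add; prev = ch'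
def bStep (st : Option Char × PySem.Set Char × PySem.Set Char) (ch : Char) :
    Option Char × PySem.Set Char × PySem.Set Char :=
  if some ch = st.1 then st
  else (some ch, PySem.Set.add st.2.1 ch,
        if PySem.Set.contains st.2.1 ch then PySem.Set.add st.2.2 ch else st.2.2)

def solution_alt (input_string : String) : String :=
  let st := input_string.toList.foldl bStep (none, PySem.Set.empty, PySem.Set.empty)
  if st.2.2.isEmpty then "N"
  else String.ofList (PySem.List.sorted st.2.2 (fun c => c) false)

-- ===== PRECONDITION & SPEC =====
def Spec_solution (input_string : String) (out : String) : Prop := out = solution_alt input_string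
instance (input_string : String) (out : String) : Decidable (Spec_solution input_string out) := by unfold Spec_solution; infer_instance

-- ===== CLAIM (what is proved, stated in full; the proofs are below) =====
def Claim_equal_solution : Prop := ∀ (input_string : String), Dom_solution input_string → Spec_solution input_string (solution input_string)

-- ===== LEMMAS AND PROOFS =====

-- the list of indices at which c occurs in l, counting from s
def occ : List Char → Char → Int → List Int
  | [], _, _ => []
  | x :: xs, c, s => (if x = c then [s] else []) ++ occ xs c (s + 1)

-- run compression (adjacent dedup)
def rc : List Char → List Char
  | [] => []
  | [x] => [x]
  | x :: y :: t => if x = y then rc (y :: t) else x :: rc (y :: t)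

-- clean form of A's adjacent-gap check
def gapB : List Int → Bool
  | a :: b :: t => (1 < b - a) || gapB (b :: t)
  | _ => false

lemma buildCount_eq (pairs : List (Int × Char)) :
    buildCount pairs =
      pairs.foldl (fun d p => d.insert p.2 (d.getD p.2 [] ++ [p.1])) PySem.Dict.empty := by
  unfold buildCount
  apply PySem.List.foldl_congr_mem
  intro d p _
  by_cases h : d.contains p.2 = false
  · simp only [h, if_true]
    rw [PySem.Dict.getD_eq_get?_getD, (PySem.Dict.get?_eq_none_iff_contains d p.2).2 h]
    rfl
  · simp [h]

lemma getD_build (pairs : List (Int × Char)) (d : PySem.Dict Char (List Int)) (c : Char) :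
    (pairs.foldl (fun d p => d.insert p.2 (d.getD p.2 [] ++ [p.1])) d).getD c []
      = d.getD c [] ++ (pairs.filter (fun p => p.2 = c)).map (·.1) := by
  induction pairs generalizing d with
  | nil => simp
  | cons p t ih =>
    simp only [List.foldl_cons, ih, List.filter_cons]
    by_cases h : p.2 = c
    · simp [h, PySem.Dict.getD_insert]
    · simp [h, PySem.Dict.getD_insert, Ne.symm h]

lemma occ_eq_filter (l : List Char) (c : Char) (s : Int) :
    ((PySem.List.enumerate l s).filter (fun p => p.2 = c)).map (·.1) = occ l c s := by
  induction l generalizing s with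
  | nil => simp [occ, PySem.List.enumerate]
  | cons x xs ih =>
    rw [PySem.List.enumerate_cons]
    by_cases h : x = c
    · simp [occ, h, ih]
    · simp [occ, h, ih]

lemma occ_ge (l : List Char) (c : Char) (s : Int) : ∀ j ∈ occ l c s, s ≤ j := by
  induction l generalizing s with
  | nil => simp [occ]
  | cons x xs ih =>
    intro j hj
    simp only [occ, List.mem_append] at hj
    rcases hj with hj | hj
    · split at hj <;> simp_all
    · have := ih (s + 1) j hj; omega

lemma occ_eq_nil_iff (l : List Char) (c : Char) (s : Int) : occ l c s = [] ↔ c ∉ l := by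
  induction l generalizing s with
  | nil => simp [occ]
  | cons x xs ih =>
    by_cases h : x = c <;> simp [occ, h, ih, Ne.symm]

lemma rc_cons_head (x : Char) (t : List Char) : ∃ r, rc (x :: t) = x :: r := by
  induction t with
  | nil => exact ⟨[], rfl⟩
  | cons y u ih =>
    by_cases h : x = y
    · subst h; simpa [rc] using ih
    · exact ⟨rc (y :: u), by simp [rc, h]⟩

lemma mem_rc (l : List Char) (c : Char) : c ∈ rc l ↔ c ∈ l := by
  induction l with
  | nil => simp [rc]
  | cons x t ih =>
    cases t with
    | nil => simp [rc]
    | cons y u =>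
      by_cases h : x = y
      · subst h
        have hrc : rc (x :: x :: u) = rc (x :: u) := by simp [rc]
        rw [hrc, ih]; simp
      · simp only [rc, if_neg h, List.mem_cons]; rw [ih]; simp

lemma gapB_iff (v : List Int) :
    gapB v = true ↔ ∃ k, k + 1 < v.length ∧ 1 < v.getD (k + 1) 0 - v.getD k 0 := by
  induction v with
  | nil => simp [gapB]
  | cons a t ih =>
    cases t with
    | nil => simp [gapB]
    | cons b u =>
      simp only [gapB, Bool.or_eq_true, ih, decide_eq_true_eq]
      constructor
      · rintro (h | ⟨k, hk, hgt⟩)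
        · exact ⟨0, by simp, by simpa using h⟩
        · exact ⟨k + 1, by simp at hk ⊢; omega, by simpa using hgt⟩
      · rintro ⟨k, hk, hgt⟩
        cases k with
        | zero => left; simpa using hgt
        | succ k =>
          right
          exact ⟨k, by simp at hk ⊢; omega, by simpa using hgt⟩

lemma gapLoop_eq_any (value : List Int) (idxs : List Int) :
    gapLoop value idxs
      = idxs.any (fun i => decide (1 < PySem.List.pyGetD value (i + 1) 0 - PySem.List.pyGetD value i 0)) := by
  induction idxs with
  | nil => simp [gapLoop]
  | cons i r ih =>
    simp only [gapLoop, List.any_cons, ← ih]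
    split <;> simp_all

-- A's 'len(value) >= 2' guard plus the range loop equal the clean gap check
lemma check_eq_gapB (v : List Int) :
    (if 2 ≤ v.length then
       (if gapLoop v (PySem.List.pyRange 0 ((v.length : Int) - 1) 1) then true else false)
     else false) = gapB v := by
  by_cases h2 : 2 ≤ v.length
  · rw [if_pos h2]
    have hb : ∀ b : Bool, (if b = true then true else false) = b := by decide
    rw [hb, gapLoop_eq_any]
    rw [PySem.List.pyRange_of_pos 0 ((v.length : Int) - 1) one_pos]
    have hlt : (0 : Int) < (v.length : Int) - 1 := by
      have : (2 : Int) ≤ (v.length : Int) := by exact_mod_cast h2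
      omega
    rw [if_pos hlt]
    have harg : ((v.length : Int) - 1 - 0 + 1 - 1) / 1 = (v.length : Int) - 1 := by omega
    rw [harg]
    have htn : ((v.length : Int) - 1).toNat = v.length - 1 := by omega
    rw [htn, List.any_map]
    have hfun : ∀ k : Nat,
        (decide (1 < PySem.List.pyGetD v (0 + 1 * (k : Int) + 1) 0 - PySem.List.pyGetD v (0 + 1 * (k : Int)) 0))
          = decide (1 < v.getD (k + 1) 0 - v.getD k 0) := by
      intro k
      have e1 : (0 + 1 * (k : Int) + 1) = ((k + 1 : Nat) : Int) := by push_cast; ring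
      have e2 : (0 + 1 * (k : Int)) = ((k : Nat) : Int) := by push_cast; ring
      rw [e1, e2, PySem.List.pyGetD_natCast, PySem.List.pyGetD_natCast]
    rw [Bool.eq_iff_iff]
    simp only [List.any_eq_true, Function.comp, List.mem_range, hfun, decide_eq_true_eq, gapB_iff]
    constructor
    · rintro ⟨k, hk, hgt⟩
      exact ⟨k, by omega, hgt⟩
    · rintro ⟨k, hk, hgt⟩
      exact ⟨k, by omega, hgt⟩
  · rw [if_neg h2]
    cases v with
    | nil => rfl
    | cons a t =>
      cases t with
      | nil => rfl
      | cons b u => simp only [List.length_cons] at h2; omega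

-- the heart of the equivalence: c's index list has an adjacent gap > 1
-- iff c heads at least two runs of l
lemma gapB_occ_iff (l : List Char) (c : Char) :
    ∀ s, (gapB (occ l c s) = true ↔ 2 ≤ (rc l).count c) := by
  induction l with
  | nil => intro s; simp [occ, rc, gapB]
  | cons x t ih =>
    cases t with
    | nil =>
      intro s
      by_cases h : x = c <;> simp [occ, h, rc, gapB, List.count_singleton]
    | cons y u =>
      intro s
      by_cases hxy : x = y
      · -- adjacent duplicate: run compression and the gap check both ignore x
        subst hxy
        have hrc : rc (x :: x :: u) = rc (x :: u) := by simp [rc]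
        rw [hrc, ← ih (s + 1)]
        by_cases hxc : x = c
        · subst hxc
          simp only [occ, if_pos rfl, List.singleton_append]
          cases hocc : occ (x :: u) x (s + 1) with
          | nil =>
            exact absurd (by simp : x ∈ x :: u) ((occ_eq_nil_iff _ _ _).mp hocc)
          | cons j w =>
            have hj : j = s + 1 := by
              have h2 := hocc
              simp only [occ, if_pos rfl, List.singleton_append] at h2
              exact (List.cons_eq_cons.mp h2).1.symm
            subst hj
            simp [gapB]
        · simp [occ, hxc]
      · -- x ≠ y : a run of x ends at position s
        have hrc : rc (x :: y :: u) = x :: rc (y :: u) := by simp [rc, hxy]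
        rw [hrc]
        by_cases hxc : x = c
        · -- the head run is a c-run; a gap exists iff c occurs again later
          subst hxc
          have hyc : y ≠ x := fun h => hxy h.symm
          have hocc : occ (x :: y :: u) x s = s :: occ u x (s + 1 + 1) := by
            simp [occ, hyc]
          rw [hocc]
          have hcount : (x :: rc (y :: u)).count x = (rc (y :: u)).count x + 1 := by
            simp [List.count_cons]
          rw [hcount]
          have hmem : x ∈ rc (y :: u) ↔ x ∈ u := by
            rw [mem_rc]; simp [Ne.symm hyc, eq_comm]
          constructor
          · intro hg
            cases hocc2 : occ u x (s + 1 + 1) with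
            | nil => rw [hocc2] at hg; simp [gapB] at hg
            | cons j w =>
              have hxu : x ∈ u := by
                by_contra hnot
                rw [← occ_eq_nil_iff u x (s + 1 + 1)] at hnot
                rw [hnot] at hocc2; cases hocc2
              have h1 : 0 < (rc (y :: u)).count x := List.count_pos_iff.mpr (hmem.mpr hxu)
              omega
          · intro hge
            have hxin : x ∈ rc (y :: u) := by
              refine List.count_pos_iff.mp ?_
              omega
            have hxu : x ∈ u := hmem.mp hxin
            cases hocc2 : occ u x (s + 1 + 1) with
            | nil => rw [occ_eq_nil_iff] at hocc2; exact absurd hxu hocc2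
            | cons j w =>
              have hjge : s + 1 + 1 ≤ j := occ_ge u x (s + 1 + 1) j (by rw [hocc2]; simp)
              simp only [gapB, Bool.or_eq_true, decide_eq_true_eq]
              left; omega
        · -- head run is not a c-run: drop it on both sides
          have hocc : occ (x :: y :: u) c s = occ (y :: u) c (s + 1) := by
            simp [occ, hxc]
          rw [hocc, ih (s + 1)]
          simp [List.count_cons, hxc, Ne.symm]

lemma foldB_ans_nodup (l : List Char) (st : Option Char × PySem.Set Char × PySem.Set Char)
    (h : st.2.2.Nodup) : ((l.foldl bStep st).2.2).Nodup := by
  induction l generalizing st with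
  | nil => exact h
  | cons x t ih =>
    simp only [List.foldl_cons]
    apply ih
    unfold bStep
    split
    · exact h
    · split
      · exact PySem.Set.nodup_add _ _ h
      · exact h

lemma two_le_count_succ (r : List Char) (c : Char) : 2 ≤ r.count c + 1 ↔ c ∈ r :=
  ⟨fun h => List.count_pos_iff.mp (by omega),
   fun h => by have := List.count_pos_iff.mpr h; omega⟩

lemma foldB_ans_mem (l : List Char) (p : Char) (seen ans : PySem.Set Char) (c : Char)
    (hp : p ∈ seen) :
    c ∈ (l.foldl bStep (some p, seen, ans)).2.2 ↔
      c ∈ ans ∨ (c ∈ seen ∧ c ∈ (rc (p :: l)).tail) ∨ (c ∉ seen ∧ 2 ≤ (rc (p :: l)).count c) := by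
  induction l generalizing p seen ans with
  | nil =>
    simp only [List.foldl_nil]
    have h1 : rc [p] = [p] := rfl
    rw [h1]
    simp only [List.tail_cons, List.count_singleton, List.not_mem_nil, and_false, false_or]
    constructor
    · intro h; left; exact h
    · rintro (h | ⟨_, h⟩)
      · exact h
      · split at h <;> omega
  | cons z t ih =>
    simp only [List.foldl_cons]
    by_cases hzp : z = p
    · -- same run continues
      subst hzp
      have hstep : bStep (some z, seen, ans) z = (some z, seen, ans) := by
        simp [bStep]
      have hrc : rc (z :: z :: t) = rc (z :: t) := by simp [rc]
      rw [hstep, ih z seen ans hp, hrc]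
    · -- a new run starts on z
      have hpz : p ≠ z := fun h => hzp h.symm
      have hstep : bStep (some p, seen, ans) z =
          (some z, PySem.Set.add seen z,
            if PySem.Set.contains seen z then PySem.Set.add ans z else ans) := by
        simp [bStep, hzp]
      have hrc : rc (p :: z :: t) = p :: rc (z :: t) := by
        simp [rc, hpz]
      rw [hstep, ih z (PySem.Set.add seen z) _ (by rw [PySem.Set.mem_add]; exact Or.inr rfl), hrc]
      obtain ⟨r, hr⟩ := rc_cons_head z t
      rw [hr]
      simp only [List.tail_cons, PySem.Set.mem_add, List.count_cons, List.mem_cons, beq_iff_eq]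
      by_cases hcz : c = z
      · subst hcz
        by_cases hcs : c ∈ seen
        · rw [if_pos ((PySem.Set.contains_iff seen c).mpr hcs)]
          have hca : c ∈ PySem.Set.add ans c := by
            rw [PySem.Set.mem_add]; exact Or.inr rfl
          simp [hca, hcs]
        · rw [if_neg (by
            intro hcon
            exact hcs ((PySem.Set.contains_iff seen c).mp hcon))]
          have hcp : c ≠ p := fun h => hzp h
          simp only [hcs, or_true, true_and, false_or, if_pos rfl, if_neg hcp,
            not_true_eq_false, and_false, false_and, or_false]
          simp [Ne.symm hcp, two_le_count_succ, hcs]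
      · -- c is not the new run's character
        have hmemans : (c ∈ if PySem.Set.contains seen z then PySem.Set.add ans z else ans) ↔ c ∈ ans := by
          split
          · rw [PySem.Set.mem_add]; simp [hcz]
          · exact Iff.rfl
        rw [hmemans]
        have hxr : (c = z ∨ c ∈ r) ↔ c ∈ r := by simp [hcz]
        simp only [hcz, or_false, if_neg hcz, Nat.add_zero, hxr]
        by_cases hcp : c = p
        · subst hcp
          simp [hp, List.count_cons]
        · simp [Ne.symm hcp]

lemma ansB_mem (l : List Char) (c : Char) :
    c ∈ (l.foldl bStep (none, PySem.Set.empty, PySem.Set.empty)).2.2 ↔ 2 ≤ (rc l).count c := by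
  cases l with
  | nil => simp [rc]
  | cons x t =>
    simp only [List.foldl_cons]
    have hstep : bStep (none, PySem.Set.empty, PySem.Set.empty)  x =
        (some x, [x], []) := by
      simp [bStep, PySem.Set.add, PySem.Set.contains, PySem.Set.empty]
    rw [hstep, foldB_ans_mem t x [x] [] c (by simp)]
    obtain ⟨r, hr⟩ := rc_cons_head x t
    rw [hr]
    by_cases hcx : c = x
    · subst hcx
      simp [two_le_count_succ]
    · simp [hcx, List.count_cons]

-- A's answer_list characterised
lemma aList_eq (l : List Char) :
    (buildCount (PySem.List.enumerate l 0)).items.foldl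
      (fun acc kv =>
        if 2 ≤ kv.2.length then
          (if gapLoop kv.2 (PySem.List.pyRange 0 ((kv.2.length : Int) - 1) 1)
           then acc ++ [kv.1] else acc)
        else acc)
      []
    = (PySem.Set.ofList l).filter (fun k => gapB (occ l k 0)) := by
  have hb := buildCount_eq (PySem.List.enumerate l 0)
  have hkeys : (buildCount (PySem.List.enumerate l 0)).keys = PySem.Set.ofList l := by
    rw [hb, PySem.Dict.keys_foldl_insert_key (PySem.List.enumerate l 0) (fun p => p.2)
      (fun d p => d.getD p.2 [] ++ [p.1]) PySem.Dict.empty,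
      PySem.Dict.keys_empty, PySem.Set.update_nil_left, PySem.List.map_snd_enumerate]
  have hnodup : (buildCount (PySem.List.enumerate l 0)).keys.Nodup := by
    rw [hkeys]; exact PySem.Set.nodup_ofList l
  have hgetD : ∀ k, (buildCount (PySem.List.enumerate l 0)).getD k [] = occ l k 0 := by
    intro k
    rw [hb, getD_build, PySem.Dict.getD_empty, List.nil_append, occ_eq_filter]
  rw [PySem.Dict.items_eq_map_keys _ hnodup [], List.foldl_map, hkeys]
  rw [PySem.List.foldl_congr_mem _ _
    (fun acc k => if gapB (occ l k 0) = true then acc ++ [id k] else acc) []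
    (by
      intro acc k _
      simp only [hgetD k, id]
      rw [← check_eq_gapB (occ l k 0)]
      by_cases h1 : 2 ≤ (occ l k 0).length
      · by_cases h2 : gapLoop (occ l k 0) (PySem.List.pyRange 0 (((occ l k 0).length : Int) - 1) 1) = true
        · simp [h1, h2]
        · simp [h1, h2]
      · simp [h1])]
  rw [PySem.List.foldl_append_if, List.map_id, List.nil_append]

lemma aList_mem (l : List Char) (c : Char) :
    c ∈ (PySem.Set.ofList l).filter (fun k => gapB (occ l k 0)) ↔ 2 ≤ (rc l).count c := by
  rw [List.mem_filter, PySem.Set.mem_ofList]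
  constructor
  · rintro ⟨hmem, hg⟩
    exact (gapB_occ_iff l c 0).mp hg
  · intro h2
    refine ⟨?_, (gapB_occ_iff l c 0).mpr h2⟩
    have hcr : c ∈ rc l := List.count_pos_iff.mp (by omega)
    exact (mem_rc l c).mp hcr

-- ===== VERDICT (by name: the statement is the Claim_ definition above) =====
theorem solution_spec : Claim_equal_solution := by
  intro input_string _
  unfold Spec_solution solution solution_alt
  simp only [aList_eq]
  set LA := (PySem.Set.ofList input_string.toList).filter
      (fun k => gapB (occ input_string.toList k 0)) with hLA
  set LB := (input_string.toList.foldl bStep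
      (none, PySem.Set.empty, PySem.Set.empty)).2.2 with hLB
  have hperm : LA.Perm LB := by
    rw [List.perm_ext_iff_of_nodup
      (List.Nodup.filter _ (PySem.Set.nodup_ofList _))
      (foldB_ans_nodup _ _ List.nodup_nil)]
    intro a
    exact Iff.trans (aList_mem _ a) (ansB_mem _ a).symm
  have hlen : LA.length = LB.length := hperm.length_eq
  have hsort : PySem.List.sorted LA (fun c => c) false = PySem.List.sorted LB (fun c => c) false :=
    PySem.List.sorted_eq_sorted_of_perm LA LB (fun c => c) (fun _ _ h => h) hperm
  rw [hsort]
  have hnil : LA = [] ↔ LB = [] :=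
    ⟨fun h => List.Perm.eq_nil ((h ▸ hperm).symm),
     fun h => List.Perm.eq_nil (h ▸ hperm.symm).symm⟩
  by_cases h1 : LA.length = 0
  · have hLBnil : LB = [] := hnil.mp (List.length_eq_zero_iff.mp h1)
    rw [if_pos h1, if_pos (by rw [List.isEmpty_iff]; exact hLBnil)]
  · have hLBne : ¬LB.isEmpty = true := by
      rw [List.isEmpty_iff]
      intro h
      exact h1 (List.length_eq_zero_iff.mpr (hnil.mpr h))
    rw [if_neg h1, if_neg hLBne]
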